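-- pv_equiv track=rewrite | github.com/JungChangwoo/Algorithm_PS | Kakao/ParenthesisTransformation.py | divide_idx
-- ===== SOURCE A (Python) =====
-- def divide_idx(p):
--     left, right = 0, 0
--     for i in range(len(p)):
--         if p[i] == '(':
--             left += 1
--         else:
--             right += 1
--         if left == right:
--             return i
--     return 0
-- ===== SOURCE B (Python) =====
-- def divide_idx(p):
--     # Search over even prefix lengths, recounting from scratch: a prefix is
--     # balanced iff exactly half of its characters are '(' (so its length is even).
--     n = len(p)
--     L = 2
--     while L <= n:
--         if 2 * p[:L].count('(') == L:
--             return L - 1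
--         L += 2
--     return 0
-- ===== Notes on version B (the rewrite author's own statement) =====
-- stated objective: alternative
-- what changed: Replaces the single running-balance loop by a search over even prefix lengths: a while loop steps L by 2 and recounts the opening brackets in p[:L] from scratch, returning L-1 at the first L where exactly half the prefix consists of opening brackets (a prefix is balanced iff that holds, and such a prefix has even length); trades the O(n) fused scan for an O(n^2) count-per-prefix search.
import Mathlib
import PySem

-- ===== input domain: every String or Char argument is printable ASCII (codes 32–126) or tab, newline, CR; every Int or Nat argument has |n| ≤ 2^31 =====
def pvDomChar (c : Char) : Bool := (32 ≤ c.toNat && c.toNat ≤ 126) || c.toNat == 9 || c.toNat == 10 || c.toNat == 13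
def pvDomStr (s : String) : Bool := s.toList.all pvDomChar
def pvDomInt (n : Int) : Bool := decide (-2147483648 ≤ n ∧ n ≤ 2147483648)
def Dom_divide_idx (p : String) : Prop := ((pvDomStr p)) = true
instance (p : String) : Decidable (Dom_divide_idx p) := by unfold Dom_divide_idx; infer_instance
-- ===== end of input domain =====

-- B replaces A's fused running-balance loop by a step-2 search over even prefix lengths,
-- recounting the opening brackets of each prefix from scratch (alternative decomposition; same return value).

-- ===== PORT A =====
-- for i in range(len(p)): two counters, early return of i
def divideIdxGoA : List Char → Int → Int → Int → Int
  | [], _, _, _ => 0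
  | c :: cs, i, left, right =>
    let left' := if c = '(' then left + 1 else left
    let right' := if c = '(' then right else right + 1
    if left' = right' then i else divideIdxGoA cs (i + 1) left' right'

def divide_idx (p : String) : Int := divideIdxGoA p.toList 0 0 0

-- ===== PORT B =====
-- while L <= n: if 2 * p[:L].count('(') == L: return L - 1; L += 2
def divideIdxGoB (cs : List Char) (n L : Nat) : Int :=
  if _h : L ≤ n then
    if 2 * ((PySem.Chars.count (PySem.List.slice cs none (some (L : Int))) ['(']) : Int) = (L : Int)
    then (L : Int) - 1
    else divideIdxGoB cs n (L + 2)
  else 0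
termination_by n + 1 - L
decreasing_by omega

def divide_idx_alt (p : String) : Int := divideIdxGoB p.toList p.toList.length 2

-- ===== PRECONDITION & SPEC =====
def Spec_divide_idx (p : String) (out : Int) : Prop := out = divide_idx_alt p
instance (p : String) (out : Int) : Decidable (Spec_divide_idx p out) := by unfold Spec_divide_idx; infer_instance

-- ===== CLAIM (what is proved, stated in full; the proofs are below) =====
def Claim_equal_divide_idx : Prop := ∀ (p : String), Dom_divide_idx p → Spec_divide_idx p (divide_idx p)

-- ===== LEMMAS AND PROOFS =====

-- common reference searcher: first j in [j..n] whose length-j prefix has '('-count j/2, returning j-1, else 0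
def pvSearch (cs : List Char) (n j : Nat) : Int :=
  if _h : j ≤ n then
    if 2 * (cs.take j).count '(' = j then (j : Int) - 1 else pvSearch cs n (j + 1)
  else 0
termination_by n + 1 - j
decreasing_by omega

theorem countGo_single (l : List Char) : ∀ (fuel acc : Nat), l.length ≤ fuel →
    PySem.Chars.count.go ['('] fuel l acc = acc + l.count '(' := by
  induction l with
  | nil =>
    intro fuel acc _
    cases fuel <;> simp [PySem.Chars.count.go]
  | cons c t ih =>
    intro fuel acc h
    cases fuel with
    | zero => simp at h
    | succ f =>
      simp only [PySem.Chars.count.go, List.isPrefixOf, List.count_cons]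
      by_cases hc : c = '('
      · simp [hc, ih f (acc + 1) (by simpa using h)]
        omega
      · have : ('(' == c) = false := by simpa [beq_iff_eq] using fun h' => hc h'.symm
        simp [this, ih f acc (by simpa using h), hc]

theorem count_single (cs : List Char) : PySem.Chars.count cs ['('] = cs.count '(' := by
  simpa [PySem.Chars.count] using countGo_single cs cs.length 0 le_rfl

theorem goA_eq_search (full : List Char) : ∀ (m k : Nat), full.length - k = m → k ≤ full.length →
    divideIdxGoA (full.drop k) (k : Int) ((full.take k).count '(' : Int)
      ((k : Int) - ((full.take k).count '(' : Int)) = pvSearch full full.length (k + 1) := by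
  intro m
  induction m with
  | zero =>
    intro k hm hk
    have hkl : k = full.length := by omega
    rw [pvSearch]
    rw [dif_neg (by omega)]
    simp [hkl]
    rfl
  | succ m ih =>
    intro k hm hk
    have hklt : k < full.length := by omega
    rw [List.drop_eq_getElem_cons hklt]
    have htake : full.take (k + 1) = full.take k ++ [full[k]] := by
      rw [List.take_add_one]
      simp [List.getElem?_eq_getElem hklt]
    rw [pvSearch, dif_pos (by omega)]
    set l := (full.take k).count '(' with hl
    simp only [divideIdxGoA]
    by_cases hc : full[k] = '('
    · have hcnt : (full.take (k + 1)).count '(' = l + 1 := by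
        rw [htake, List.count_append]; simp [hc]; exact hl.symm
      simp only [hc, reduceIte]
      by_cases hb : 2 * (full.take (k + 1)).count '(' = k + 1
      · rw [if_pos (show ((l : Int) + 1) = (k : Int) - l by omega), if_pos hb]
        push_cast; ring
      · rw [if_neg (show ¬ ((l : Int) + 1) = (k : Int) - l by omega), if_neg hb]
        rw [show ((k : Int) + 1) = (((k + 1 : Nat)) : Int) by push_cast; ring,
            show ((l : Int) + 1) = (((full.take (k + 1)).count '(' : Nat) : Int) by rw [hcnt]; push_cast; ring,
            show ((k : Int) - l) = ((((k + 1 : Nat)) : Int) - (((full.take (k + 1)).count '(' : Nat) : Int)) by rw [hcnt]; push_cast; ring]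
        exact ih (k + 1) (by omega) (by omega)
    · have hcnt : (full.take (k + 1)).count '(' = l := by
        rw [htake, List.count_append]; simp [hc]; exact hl.symm
      simp only [if_neg hc]
      by_cases hb : 2 * (full.take (k + 1)).count '(' = k + 1
      · rw [if_pos (show ((l : Int)) = (k : Int) - l + 1 by omega), if_pos hb]
        push_cast; ring
      · rw [if_neg (show ¬ ((l : Int)) = (k : Int) - l + 1 by omega), if_neg hb]
        rw [show ((k : Int) - l + 1) = ((((k + 1 : Nat)) : Int) - (((full.take (k + 1)).count '(' : Nat) : Int)) by rw [hcnt]; push_cast; ring,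
            show ((l : Int)) = (((full.take (k + 1)).count '(' : Nat) : Int) by rw [hcnt],
            show ((k : Int) + 1) = (((k + 1 : Nat)) : Int) by push_cast; ring]
        exact ih (k + 1) (by omega) (by omega)

theorem goB_eq_search (cs : List Char) (n : Nat) : ∀ (fuel L : Nat), n + 1 ≤ L + fuel → L % 2 = 1 →
    pvSearch cs n L = divideIdxGoB cs n (L + 1) := by
  intro fuel
  induction fuel with
  | zero =>
    intro L hf _
    rw [pvSearch, dif_neg (by omega), divideIdxGoB, dif_neg (by omega)]
  | succ f ih =>
    intro L hf hodd
    by_cases hL : L ≤ n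
    · rw [pvSearch, dif_pos hL, if_neg (by omega)]
      by_cases hL1 : L + 1 ≤ n
      · rw [pvSearch, dif_pos hL1, divideIdxGoB, dif_pos hL1]
        have hsl : PySem.List.slice cs none (some ((L + 1 : Nat) : Int)) = cs.take (L + 1) :=
          PySem.List.slice_to_natCast cs (L + 1)
        have hcond : (2 * ((PySem.Chars.count (PySem.List.slice cs none (some ((L + 1 : Nat) : Int))) ['(']) : Int) = ((L + 1 : Nat) : Int))
            ↔ 2 * (cs.take (L + 1)).count '(' = L + 1 := by
          rw [hsl, count_single]
          constructor <;> intro h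
          · exact_mod_cast h
          · exact_mod_cast h
        by_cases hb : 2 * (cs.take (L + 1)).count '(' = L + 1
        · rw [if_pos hb, if_pos (hcond.mpr hb)]
        · rw [if_neg hb, if_neg (fun h => hb (hcond.mp h))]
          exact ih (L + 2) (by omega) (by omega)
      · rw [pvSearch, dif_neg (by omega), divideIdxGoB, dif_neg (by omega)]
    · rw [pvSearch, dif_neg (by omega), divideIdxGoB, dif_neg (by omega)]

-- ===== VERDICT (by name: the statement is the Claim_ definition above) =====
theorem divide_idx_spec : Claim_equal_divide_idx := by
  intro p _
  unfold Spec_divide_idx divide_idx divide_idx_alt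
  have hA := goA_eq_search p.toList p.toList.length 0 rfl (by omega)
  simp only [List.drop_zero, List.take_zero, List.count_nil, Nat.cast_zero, sub_zero] at hA
  rw [hA]
  exact goB_eq_search p.toList p.toList.length p.toList.length 1 (by omega) (by omega)
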